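-- pv_equiv track=rewrite | github.com/ricardofitas/AoC-2025 | Day 6.2/day6_2_qiskit.py | solve_classical
-- ===== SOURCE A (Python) =====
-- def build_grid(text: str):
--     lines = text.splitlines()
--     if not lines:
--         return [], 0, 0
--     width = max(len(line) for line in lines)
--     height = len(lines)
--     grid = []
--     for line in lines:
--         row = list(line)
--         if len(row) < width:
--             row += [" "] * (width - len(row))
--         grid.append(row)
--     return grid, width, height
--
-- def solve_classical(text: str) -> int:
--     grid, width, height = build_grid(text)
--     if height == 0:
--         return 0
--
--     # Operator row
--     op_row = None
--     for r in range(height - 1, -1, -1):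
--         if any(ch in "+*" for ch in grid[r]):
--             op_row = r
--             break
--     if op_row is None:
--         return 0
--
--     # Column blank flags
--     col_blank = [True] * width
--     for c in range(width):
--         for r in range(height):
--             if grid[r][c] != " ":
--                 col_blank[c] = False
--                 break
--
--     # Problem column ranges
--     problems = []
--     in_group = False
--     start = 0
--     for c in range(width):
--         if not col_blank[c]:
--             if not in_group:
--                 in_group = True
--                 start = c
--         else:
--             if in_group:
--                 problems.append((start, c - 1))
--                 in_group = False
--     if in_group:
--         problems.append((start, width - 1))
--
--     total = 0
--
--     for start_col, end_col in problems:
--         # Operator in this chunk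
--         op = None
--         for c in range(start_col, end_col + 1):
--             ch = grid[op_row][c]
--             if ch in "+*":
--                 op = ch
--                 break
--         if op is None:
--             continue
--
--         # Numbers: one per column, top->bottom
--         nums = []
--         for c in range(start_col, end_col + 1):
--             s = ""
--             for r in range(op_row):
--                 ch = grid[r][c]
--                 if ch.isdigit():
--                     s += ch
--             if s:
--                 nums.append(int(s))
--
--         if not nums:
--             continue
--
--         if op == "+":
--             val = sum(nums)
--         else:
--             val = 1
--             for x in nums:
--                 val *= x
--
--         total += val
--
--     return total
-- ===== SOURCE B (Python) =====
-- def _group_value(run, op_line, num):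
--     op = next((op_line[k] for k in run
--                if k < len(op_line) and op_line[k] in '+*'), None)
--     vals = [int(num[k]) for k in run if k in num]
--     if op is None or not vals:
--         return 0
--     if op == '+':
--         return sum(vals)
--     p = 1
--     for v in vals:
--         p *= v
--     return p
--
--
-- def solve_classical(text: str) -> int:
--     # Sparse row-major re-implementation: no padded grid and no per-group
--     # column rescans.  One sweep over the raw lines records the set of
--     # non-blank column indices and the last operator row; a dict keyed by
--     # column index accumulates each column's digit string; the problem groups
--     # are the maximal runs of consecutive indices in the sorted non-blank set.
--     lines = text.splitlines()
--     nonblank = set()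
--     op_row = -1
--     for r, line in enumerate(lines):
--         for c, ch in enumerate(line):
--             if ch != ' ':
--                 nonblank.add(c)
--                 if ch == '+' or ch == '*':
--                     op_row = r
--     if op_row < 0:
--         return 0
--     num = {}
--     for line in lines[:op_row]:
--         for c, ch in enumerate(line):
--             if ch.isdigit():
--                 num[c] = num.get(c, '') + ch
--     op_line = lines[op_row]
--     total = 0
--     run = []
--     for c in sorted(nonblank) + [None]:
--         if run and (c is None or c != run[-1] + 1):
--             total += _group_value(run, op_line, num)
--             run = []
--         if c is not None:
--             run.append(c)
--     return total
-- ===== Notes on version B (the rewrite author's own statement) =====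
-- stated objective: alternative
-- what changed: B never builds the padded grid: one row-major sweep records the sparse set of non-blank column indices and the last operator row, a dict keyed by column index accumulates each column's digit string, and the problem groups are recovered as maximal runs of consecutive indices in the sorted set, replacing A's padded row-major grid, blank-flag array, (start,end) range state machine and per-group column rescans.
import Mathlib
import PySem

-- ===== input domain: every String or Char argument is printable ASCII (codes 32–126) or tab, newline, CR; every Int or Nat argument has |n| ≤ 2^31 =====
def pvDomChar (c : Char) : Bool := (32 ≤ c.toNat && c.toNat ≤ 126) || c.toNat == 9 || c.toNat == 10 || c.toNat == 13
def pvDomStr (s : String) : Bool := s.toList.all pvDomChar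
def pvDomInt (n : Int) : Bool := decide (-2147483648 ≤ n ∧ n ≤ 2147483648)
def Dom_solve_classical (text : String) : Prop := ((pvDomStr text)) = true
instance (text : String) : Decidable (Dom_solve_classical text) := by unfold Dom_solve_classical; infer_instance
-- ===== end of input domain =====

-- B re-implements A sparsely and row-major: one sweep over the raw lines records the set of
-- non-blank column indices and the last operator row, a dict keyed by column index accumulates
-- each column's digit string, and the problem groups are the maximal runs of consecutive indices
-- in the sorted set — no padded grid, no blank-flag array, no per-group column rescans.

-- ===== PORT A =====
-- 'ch in "+*"' for a single grid character
def pvIsOp (c : Char) : Bool := c == '+' || c == '*'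

-- build_grid: rows padded with spaces to the common width.
-- max(len(line) for line in lines): the .getD 0 default is never used (lines ≠ []).
def pvBuildGrid (text : String) : List (List Char) × Nat × Nat :=
  let lines := PySem.Str.splitlines text
  if lines = [] then ([], 0, 0)
  else
    let width := (PySem.List.max? (lines.map (fun l => l.toList.length)) (fun x => x)).getD 0
    let height := lines.length
    let grid := lines.map (fun l => l.toList ++ List.replicate (width - l.toList.length) ' ')
    (grid, width, height)

-- Grid accesses grid[r][c] are ported with getD: every index the loops produce is in range,
-- so the defaults are never used and the port is exact.  int(s) on the nonempty digit string s
-- is PySem.Int.ofChars? (never none there, so .getD 0 is exact).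
def solve_classical (text : String) : Int :=
  let gwh := pvBuildGrid text
  let grid := gwh.1
  let width := gwh.2.1
  let height := gwh.2.2
  if height = 0 then 0
  else
    -- for r in range(height-1, -1, -1): first r (from the bottom) whose row has an operator
    match (List.range height).reverse.find? (fun r => (grid.getD r []).any pvIsOp) with
    | none => 0
    | some opRow =>
      -- col_blank[c]: the inner for/break is 'all chars of the column are spaces'
      let colBlank := (List.range width).map (fun c =>
        (List.range height).all (fun r => (grid.getD r []).getD c ' ' == ' '))
      -- problem ranges: the in_group/start state machine over c in range(width)
      let st := (List.range width).foldl (fun st c =>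
          if !(colBlank.getD c true) then
            (if !st.2.1 then (st.1, true, c) else st)
          else
            (if st.2.1 then (st.1 ++ [(st.2.2, c - 1)], false, st.2.2) else st))
        (([] : List (Nat × Nat)), false, 0)
      let problems := if st.2.1 then st.1 ++ [(st.2.2, width - 1)] else st.1
      problems.foldl (fun total se =>
        -- for c in range(start, end+1): ch = grid[op_row][c]; first operator char
        match ((List.range' se.1 (se.2 + 1 - se.1)).map
            (fun c => (grid.getD opRow []).getD c ' ')).find? pvIsOp with
        | none => total
        | some op =>
          let nums := (List.range' se.1 (se.2 + 1 - se.1)).foldl (fun nums c =>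
            let ds := (List.range opRow).foldl (fun acc r =>
              if PySem.Chars.isdigit ((grid.getD r []).getD c ' ')
              then acc ++ [(grid.getD r []).getD c ' '] else acc) []
            if ds = [] then nums else nums ++ [(PySem.Int.ofChars? ds).getD 0]) ([] : List Int)
          if nums = [] then total
          else if op == '+' then total + nums.foldl (· + ·) 0
          else total + nums.foldl (· * ·) 1) 0

-- ===== PORT B =====
-- _group_value(run, op_line, num) of Source B; op_line[k] is guarded by 'k < len(op_line)' and
-- k ≥ 0 (column indices), so the pyGet? access is in range and .getD ' ' is exact;
-- num[k] is guarded by 'k in num', so getD [] is exact.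
def pvGroupValB (opLine : List Char) (num : PySem.Dict Int (List Char)) (run : List Int) : Int :=
  let op := (run.find? (fun k =>
      decide (k < PySem.List.len opLine) && pvIsOp ((PySem.List.pyGet? opLine k).getD ' '))).map
    (fun k => (PySem.List.pyGet? opLine k).getD ' ')
  let vals := (run.filter (fun k => PySem.Dict.contains num k)).map
    (fun k => (PySem.Int.ofChars? (PySem.Dict.getD num k [])).getD 0)
  match op with
  | none => 0
  | some opc =>
    if vals = [] then 0
    else if opc == '+' then vals.sum
    else vals.foldl (· * ·) 1

-- solve_classical of Source B.  The int sentinel op_row = -1 is ported as Option (none = -1,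
-- 'op_row < 0' = the none branch); op_row ≥ 0 whenever it is used, so .toNat is exact.
def solve_classical_alt (text : String) : Int :=
  let lines := PySem.Str.splitlines text
  -- pass 1: the set of non-blank column indices and the last operator row
  let st1 := (PySem.List.enumerate lines).foldl (fun st rl =>
      (PySem.List.enumerate rl.2.toList).foldl (fun st cc =>
        if cc.2 != ' ' then
          (PySem.Set.add st.1 cc.1,
           if cc.2 == '+' || cc.2 == '*' then some rl.1 else st.2)
        else st) st)
    ((PySem.Set.empty : PySem.Set Int), (none : Option Int))
  match st1.2 with
  | none => 0
  | some opRow =>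
    -- num[c] = num.get(c, '') + ch over the rows above the operator row
    let num := (lines.take opRow.toNat).foldl (fun d line =>
        (PySem.List.enumerate line.toList).foldl (fun d cc =>
          if PySem.Chars.isdigit cc.2 then
            PySem.Dict.insert d cc.1 (PySem.Dict.getD d cc.1 [] ++ [cc.2])
          else d) d) (PySem.Dict.empty : PySem.Dict Int (List Char))
    let opLine := (lines.getD opRow.toNat "").toList
    -- for c in sorted(nonblank) + [None]: flush a maximal consecutive run, then append c
    (((PySem.List.sorted st1.1 (fun x => x)).map some ++ [none]).foldl
      (fun (st : Int × List Int) (oc : Option Int) =>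
        let st' :=
          if st.2 ≠ [] ∧ (oc = none ∨ oc ≠ some (st.2.getLast! + 1)) then
            (st.1 + pvGroupValB opLine num st.2, ([] : List Int))
          else st
        match oc with
        | some c => (st'.1, st'.2 ++ [c])
        | none => st') ((0 : Int), ([] : List Int))).1

-- ===== PRECONDITION & SPEC =====
def Spec_solve_classical (text : String) (out : Int) : Prop := out = solve_classical_alt text
instance (text : String) (out : Int) : Decidable (Spec_solve_classical text out) := by unfold Spec_solve_classical; infer_instance

-- ===== CLAIM (what is proved, stated in full; the proofs are below) =====
def Claim_equal_solve_classical : Prop := ∀ (text : String), Dom_solve_classical text → Spec_solve_classical text (solve_classical text)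

-- ===== LEMMAS AND PROOFS =====

theorem find?_congr' {α : Type} (l : List α) (p q : α → Bool)
    (h : ∀ x ∈ l, p x = q x) : l.find? p = l.find? q := by
  induction l with
  | nil => rfl
  | cons a l ih =>
    simp only [List.find?_cons]
    rw [h a (by simp)]
    cases q a
    · exact ih (fun x hx => h x (by simp [hx]))
    · rfl

theorem all_congr' {α : Type} (l : List α) (p q : α → Bool)
    (h : ∀ x ∈ l, p x = q x) : l.all p = l.all q := by
  induction l with
  | nil => rfl
  | cons a l ih =>
    simp only [List.all_cons]
    rw [h a (by simp), ih (fun x hx => h x (by simp [hx]))]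

-- padded-row access: the space padding and the getD default coincide
theorem pad_getD (l : List Char) (k c : Nat) :
    (l ++ List.replicate k ' ').getD c ' ' = l.getD c ' ' := by
  rcases lt_or_ge c l.length with h | h
  · simp [List.getD, List.getElem?_append_left h]
  · simp only [List.getD, List.getElem?_append_right h, List.getElem?_replicate]
    rw [List.getElem?_eq_none (by omega)]
    split <;> simp

-- all over an index range of exactly the length = all over the list
theorem all_range_getD {α : Type} (l : List α) (p : α → Bool) (d : α) :
    (List.range l.length).all (fun r => p (l.getD r d)) = l.all p := by
  rw [Bool.eq_iff_iff]
  simp only [List.all_eq_true, List.mem_range]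
  constructor
  · intro h x hx
    obtain ⟨i, hi, rfl⟩ := List.mem_iff_getElem.1 hx
    have := h i hi
    rwa [List.getD_eq_getElem l d hi] at this
  · intro h r hr
    rw [List.getD_eq_getElem l d hr]
    exact h _ (List.getElem_mem _)

-- the digit-collecting fold over row indices is a take-and-filter of the column
theorem digits_fold_aux (l : List Char) (P : Char → Bool) (R : Nat) (hR : R ≤ l.length) :
    ∀ init : List Char,
      (List.range R).foldl (fun acc r => if P (l.getD r ' ') then acc ++ [l.getD r ' '] else acc) init
        = init ++ (l.take R).filter P := by
  induction R with
  | zero => simp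
  | succ R ih =>
    intro init
    rw [List.range_succ, List.foldl_append, ih (by omega)]
    have hRl : R < l.length := by omega
    rw [List.take_add_one, List.getElem?_eq_getElem hRl]
    simp only [List.foldl_cons, List.foldl_nil, List.getD_eq_getElem l ' ' hRl,
      Option.toList_some, List.filter_append, List.filter_cons, List.filter_nil]
    split <;> simp

theorem digits_fold (l : List Char) (P : Char → Bool) (R : Nat) (hR : R ≤ l.length) :
    (List.range R).foldl (fun acc r => if P (l.getD r ' ') then acc ++ [l.getD r ' '] else acc) []
      = (l.take R).filter P := by
  simpa using digits_fold_aux l P R hR []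

-- a segment of the transposed column list is the mapped index range
theorem seg_map {α : Type} (W s k : Nat) (f : Nat → α) (h : s + k ≤ W) :
    (((List.range W).map f).drop s).take k = (List.range' s k).map f := by
  apply List.ext_getElem
  · simp; omega
  · intro i h1 h2
    simp only [List.getElem_take, List.getElem_drop, List.getElem_map, List.getElem_range,
      List.getElem_range']
    congr 1
    omega

-- evaluate the non-blank columns as maximal runs (proof-layer common form of both ports)
def pvNonblank (col : List Char) : Bool := col.any (fun ch => ch != ' ')

def pvColF (lines : List String) (c : Nat) : List Char :=
  lines.map (fun l => l.toList.getD c ' ')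

def pvW (lines : List String) : Nat :=
  (PySem.List.max? (lines.map (fun l => l.toList.length)) (fun x => x)).getD 0

-- group value as A computes it on a column segment (proof layer)
def pvGroupVal (opRow : Nat) (group : List (List Char)) : Int :=
  match (group.map (fun col => col.getD opRow ' ')).find? pvIsOp with
  | none => 0
  | some op =>
    let nums := group.foldl (fun nums col =>
      let ds := (col.take opRow).filter PySem.Chars.isdigit
      if ds = [] then nums else nums ++ [(PySem.Int.ofChars? ds).getD 0]) ([] : List Int)
    if nums = [] then 0
    else if op == '+' then nums.foldl (· + ·) 0
    else nums.foldl (· * ·) 1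

def pvRuns {α : Type} (q : α → Bool) (g : List α → Int) : List α → Int → Int
  | [], total => total
  | x :: xs, total =>
    if h : q x = true then
      pvRuns q g ((x :: xs).dropWhile q) (total + g ((x :: xs).takeWhile q))
    else pvRuns q g xs total
  termination_by l _ => l.length
  decreasing_by
  · simp only [List.dropWhile_cons, h, if_pos]
    exact Nat.lt_succ_of_le (List.length_dropWhile_le q xs)
  · simp

theorem pvRuns_acc {α : Type} (q : α → Bool) (g : List α → Int) (l : List α) (t : Int) :
    pvRuns q g l t = t + pvRuns q g l 0 := by
  induction hn : l.length using Nat.strong_induction_on generalizing l t with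
  | _ n ih =>
    cases l with
    | nil => simp [pvRuns]
    | cons x xs =>
      by_cases hq : q x = true
      · rw [pvRuns, pvRuns, dif_pos hq, dif_pos hq]
        have hlen : ((x :: xs).dropWhile q).length < n := by
          rw [List.dropWhile_cons, if_pos hq]
          have := List.length_dropWhile_le q xs
          simp at hn; omega
        rw [ih _ hlen _ _ rfl, ih _ hlen _ (0 + g ((x :: xs).takeWhile q)) rfl]
        ring
      · rw [pvRuns, pvRuns, dif_neg hq, dif_neg hq]
        have hlen : xs.length < n := by simp at hn; omega
        rw [ih _ hlen _ t rfl]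

-- the index state machine of A, abstracted
def pvStep {α : Type} (q : α → Bool) (d : α) (xs : List α) :
    List (Nat × Nat) × Bool × Nat → Nat → List (Nat × Nat) × Bool × Nat :=
  fun st c =>
    if q (xs.getD c d) then
      (if !st.2.1 then (st.1, true, c) else st)
    else
      (if st.2.1 then (st.1 ++ [(st.2.2, c - 1)], false, st.2.2) else st)

def pvFin (n : Nat) (st : List (Nat × Nat) × Bool × Nat) : List (Nat × Nat) :=
  if st.2.1 then st.1 ++ [(st.2.2, n - 1)] else st.1

-- the main loop invariant: the state machine's problems, evaluated, are the runs' values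
theorem machine_aux {α : Type} (q : α → Bool) (g : List α → Int) (d : α) (xs : List α)
    (val : Nat × Nat → Int)
    (hval : ∀ s e : Nat, s ≤ e → e < xs.length → val (s, e) = g ((xs.drop s).take (e + 1 - s))) :
    ∀ (t m : Nat), m + t = xs.length → ∀ (probs : List (Nat × Nat)),
      (∀ s0 : Nat,
        (pvFin xs.length ((List.range' m t).foldl (pvStep q d xs) (probs, false, s0))).foldl
            (fun a se => a + val se) 0
          = probs.foldl (fun a se => a + val se) 0 + pvRuns q g (xs.drop m) 0)
      ∧ (∀ s0 : Nat, s0 < m → (∀ i, s0 ≤ i → i < m → q (xs.getD i d) = true) →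
        (pvFin xs.length ((List.range' m t).foldl (pvStep q d xs) (probs, true, s0))).foldl
            (fun a se => a + val se) 0
          = probs.foldl (fun a se => a + val se) 0
            + (g ((xs.drop s0).take (m - s0) ++ (xs.drop m).takeWhile q)
               + pvRuns q g ((xs.drop m).dropWhile q) 0)) := by
  intro t
  induction t with
  | zero =>
    intro m hm probs
    have hm' : m = xs.length := by omega
    subst hm'
    constructor
    · intro s0
      simp [pvFin, List.drop_length, pvRuns]
    · intro s0 hs0 hq'
      simp only [List.range'_zero, List.foldl_nil]
      have hfin : pvFin xs.length (probs, true, s0) = probs ++ [(s0, xs.length - 1)] := rfl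
      rw [hfin, List.foldl_append]
      simp only [List.foldl_cons, List.foldl_nil]
      rw [hval s0 (xs.length - 1) (by omega) (by omega)]
      have h1 : xs.length - 1 + 1 - s0 = xs.length - s0 := by omega
      rw [h1, List.take_of_length_le (by simp), List.drop_length]
      simp [pvRuns]
  | succ t ih =>
    intro m hm probs
    have hmn : m < xs.length := by omega
    have hdropm : xs.drop m = xs.getD m d :: xs.drop (m + 1) := by
      rw [List.getD_eq_getElem xs d hmn]; exact List.drop_eq_getElem_cons hmn
    constructor
    · intro s0
      rw [List.range'_succ, List.foldl_cons]
      by_cases hq : q (xs.getD m d) = true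
      · have hstep : pvStep q d xs (probs, false, s0) m = (probs, true, m) := by
          unfold pvStep; rw [if_pos hq]; rfl
        rw [hstep]
        have h2 := (ih (m + 1) (by omega) probs).2 m (by omega)
          (by intro i h1 h2; obtain rfl : i = m := le_antisymm (by omega) h1; exact hq)
        rw [h2]
        have ht1 : (xs.drop m).take (m + 1 - m) = [xs.getD m d] := by
          have h3 : m + 1 - m = 1 := by omega
          rw [h3, hdropm]; rfl
        rw [ht1, hdropm, pvRuns, dif_pos hq,
          pvRuns_acc q g ((xs.getD m d :: xs.drop (m + 1)).dropWhile q)]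
        simp only [List.takeWhile_cons, List.dropWhile_cons, hq, if_true,
          List.singleton_append]
        ring
      · have hstep : pvStep q d xs (probs, false, s0) m = (probs, false, s0) := by
          unfold pvStep; rw [if_neg hq]; rfl
        rw [hstep, (ih (m + 1) (by omega) probs).1 s0, hdropm, pvRuns, dif_neg hq]
    · intro s0 hs0 hq'
      rw [List.range'_succ, List.foldl_cons]
      by_cases hq : q (xs.getD m d) = true
      · have hstep : pvStep q d xs (probs, true, s0) m = (probs, true, s0) := by
          unfold pvStep; rw [if_pos hq]; rfl
        rw [hstep]
        have h2 := (ih (m + 1) (by omega) probs).2 s0 (by omega)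
          (by
            intro i h1 h2
            rcases Nat.lt_or_ge i m with him | him'
            · exact hq' i h1 him
            · obtain rfl : i = m := le_antisymm (by omega) him'
              exact hq)
        rw [h2]
        have hts : (xs.drop s0).take (m + 1 - s0) = (xs.drop s0).take (m - s0) ++ [xs.getD m d] := by
          have h3 : m + 1 - s0 = (m - s0) + 1 := by omega
          rw [h3, List.take_add_one, List.getElem?_drop]
          have h4 : s0 + (m - s0) = m := by omega
          rw [h4, List.getElem?_eq_getElem hmn, List.getD_eq_getElem xs d hmn]
          simp
        rw [hts, hdropm]
        simp only [List.takeWhile_cons, List.dropWhile_cons, hq, if_true,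
          List.append_assoc, List.singleton_append]
      · have hstep : pvStep q d xs (probs, true, s0) m = (probs ++ [(s0, m - 1)], false, s0) := by
          unfold pvStep; rw [if_neg hq]; rfl
        rw [hstep, (ih (m + 1) (by omega) (probs ++ [(s0, m - 1)])).1 s0, List.foldl_append]
        simp only [List.foldl_cons, List.foldl_nil]
        rw [hval s0 (m - 1) (by omega) (by omega)]
        have h3 : m - 1 + 1 - s0 = m - s0 := by omega
        rw [h3, hdropm]
        have hq0 : q (xs.getD m d) = false := by simpa using hq
        simp only [List.takeWhile_cons, List.dropWhile_cons, hq0, Bool.false_eq_true, if_false,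
          List.append_nil]
        have hr : pvRuns q g (xs.getD m d :: xs.drop (m + 1)) 0 = pvRuns q g (xs.drop (m + 1)) 0 := by
          rw [pvRuns, dif_neg hq]
        rw [hr]; ring

theorem machine_main {α : Type} (q : α → Bool) (g : List α → Int) (d : α) (xs : List α)
    (val : Nat × Nat → Int)
    (hval : ∀ s e : Nat, s ≤ e → e < xs.length → val (s, e) = g ((xs.drop s).take (e + 1 - s))) :
    (pvFin xs.length ((List.range xs.length).foldl (pvStep q d xs) ([], false, 0))).foldl
        (fun a se => a + val se) 0
      = pvRuns q g xs 0 := by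
  have h := (machine_aux q g d xs val hval xs.length 0 (by omega) []).1 0
  simpa [List.range_eq_range'] using h

-- proof-only restatements of A's port after the splitlines/empty test
def pvGridA (lines : List String) : List (List Char) :=
  lines.map (fun l => l.toList ++ List.replicate (pvW lines - l.toList.length) ' ')

def pvAStep (lines : List String) :
    List (Nat × Nat) × Bool × Nat → Nat → List (Nat × Nat) × Bool × Nat :=
  fun st c =>
    if !(((List.range (pvW lines)).map (fun c =>
        (List.range lines.length).all
          (fun r => ((pvGridA lines).getD r []).getD c ' ' == ' '))).getD c true) then
      (if !st.2.1 then (st.1, true, c) else st)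
    else
      (if st.2.1 then (st.1 ++ [(st.2.2, c - 1)], false, st.2.2) else st)

def pvAMain (lines : List String) (opRow : Nat) : Int :=
  (if ((List.range (pvW lines)).foldl (pvAStep lines) ([], false, 0)).2.1 then
      ((List.range (pvW lines)).foldl (pvAStep lines) ([], false, 0)).1
        ++ [(((List.range (pvW lines)).foldl (pvAStep lines) ([], false, 0)).2.2, pvW lines - 1)]
    else ((List.range (pvW lines)).foldl (pvAStep lines) ([], false, 0)).1).foldl
    (fun total se =>
      match ((List.range' se.1 (se.2 + 1 - se.1)).map
          (fun c => ((pvGridA lines).getD opRow []).getD c ' ')).find? pvIsOp with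
      | none => total
      | some op =>
        let nums := (List.range' se.1 (se.2 + 1 - se.1)).foldl (fun nums c =>
          let ds := (List.range opRow).foldl (fun acc r =>
            if PySem.Chars.isdigit (((pvGridA lines).getD r []).getD c ' ')
            then acc ++ [((pvGridA lines).getD r []).getD c ' '] else acc) []
          if ds = [] then nums else nums ++ [(PySem.Int.ofChars? ds).getD 0]) ([] : List Int)
        if nums = [] then total
        else if op == '+' then total + nums.foldl (· + ·) 0
        else total + nums.foldl (· * ·) 1) 0

def pvAVal (lines : List String) (opRow : Nat) (se : Nat × Nat) : Int :=
  match ((List.range' se.1 (se.2 + 1 - se.1)).map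
      (fun c => ((pvGridA lines).getD opRow []).getD c ' ')).find? pvIsOp with
  | none => 0
  | some op =>
    let nums := (List.range' se.1 (se.2 + 1 - se.1)).foldl (fun nums c =>
      let ds := (List.range opRow).foldl (fun acc r =>
        if PySem.Chars.isdigit (((pvGridA lines).getD r []).getD c ' ')
        then acc ++ [((pvGridA lines).getD r []).getD c ' '] else acc) []
      if ds = [] then nums else nums ++ [(PySem.Int.ofChars? ds).getD 0]) ([] : List Int)
    if nums = [] then 0
    else if op == '+' then nums.foldl (· + ·) 0
    else nums.foldl (· * ·) 1

theorem solve_classical_eq (text : String) :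
    solve_classical text =
      if PySem.Str.splitlines text = [] then 0
      else
        match (List.range (PySem.Str.splitlines text).length).reverse.find?
            (fun r => ((pvGridA (PySem.Str.splitlines text)).getD r []).any pvIsOp) with
        | none => 0
        | some opRow => pvAMain (PySem.Str.splitlines text) opRow := by
  by_cases hl : PySem.Str.splitlines text = []
  · rw [if_pos hl]; simp [solve_classical, pvBuildGrid, hl]
  · rw [if_neg hl]
    have h0 : (PySem.Str.splitlines text).length ≠ 0 := by
      simpa [List.length_eq_zero_iff] using hl
    simp only [solve_classical, pvBuildGrid]
    rw [if_neg hl]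
    simp only []
    rw [if_neg h0]
    simp only [pvAMain, pvGridA, pvW]
    rfl

-- width bounds every line length
theorem pvW_isMax (lines : List String) (hl : lines ≠ []) :
    ∀ l ∈ lines, l.toList.length ≤ pvW lines := by
  intro l hml
  unfold pvW
  cases hm : PySem.List.max? (lines.map (fun l => l.toList.length)) (fun x => x) with
  | none =>
    exact absurd (by simpa using (PySem.List.max?_eq_none_iff _ _).1 hm) hl
  | some m =>
    have := PySem.List.max?_isMax hm l.toList.length
      (List.mem_map_of_mem (f := fun l => l.toList.length) hml)
    simpa using this

-- padded-grid access = column access, for r < height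
theorem pvAcc (lines : List String) (r c : Nat) (hr : r < lines.length) :
    ((pvGridA lines).getD r []).getD c ' ' = (pvColF lines c).getD r ' ' := by
  unfold pvGridA pvColF
  rw [List.getD_eq_getElem
        (lines.map (fun l => l.toList ++ List.replicate (pvW lines - l.toList.length) ' '))
        ([] : List Char) (by simpa using hr),
      List.getD_eq_getElem (lines.map (fun l => l.toList.getD c ' ')) ' ' (by simpa using hr)]
  simp only [List.getElem_map]
  exact pad_getD _ _ _

-- a padded grid row has an operator iff the raw line has one
theorem rowAny_eq (lines : List String) (r : Nat) (hr : r < lines.length) :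
    ((pvGridA lines).getD r []).any pvIsOp = (lines.getD r "").toList.any pvIsOp := by
  unfold pvGridA
  rw [List.getD_eq_getElem
        (lines.map (fun l => l.toList ++ List.replicate (pvW lines - l.toList.length) ' '))
        ([] : List Char) (by simpa using hr),
      List.getD_eq_getElem lines "" hr]
  simp only [List.getElem_map, List.any_append, List.any_replicate]
  have : pvIsOp ' ' = false := by decide
  rw [this]
  cases lines[r].toList.any pvIsOp <;> simp

-- per-problem values agree on in-range problems
theorem pvVal_eq (lines : List String) (opRow : Nat) (hop : opRow < lines.length)
    (s e : Nat) (hse : s ≤ e) (he : e < pvW lines) :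
    pvAVal lines opRow (s, e)
      = pvGroupVal opRow
          (((((List.range (pvW lines)).map (pvColF lines))).drop s).take (e + 1 - s)) := by
  have hseg : ((((List.range (pvW lines)).map (pvColF lines))).drop s).take (e + 1 - s)
      = (List.range' s (e + 1 - s)).map (pvColF lines) :=
    seg_map (pvW lines) s (e + 1 - s) (pvColF lines) (by omega)
  rw [hseg]
  unfold pvAVal pvGroupVal
  have hmap : ((List.range' s (e + 1 - s)).map (pvColF lines)).map (fun col => col.getD opRow ' ')
      = (List.range' s (e + 1 - s)).map
          (fun c => ((pvGridA lines).getD opRow []).getD c ' ') := by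
    rw [List.map_map]
    exact List.map_congr_left (fun c hc => (pvAcc lines opRow c hop).symm)
  rw [hmap]
  cases hf : ((List.range' s (e + 1 - s)).map
      (fun c => ((pvGridA lines).getD opRow []).getD c ' ')).find? pvIsOp with
  | none => rfl
  | some op =>
    have hnums : (List.range' s (e + 1 - s)).foldl (fun nums c =>
          let ds := (List.range opRow).foldl (fun acc r =>
            if PySem.Chars.isdigit (((pvGridA lines).getD r []).getD c ' ')
            then acc ++ [((pvGridA lines).getD r []).getD c ' '] else acc) []
          if ds = [] then nums else nums ++ [(PySem.Int.ofChars? ds).getD 0]) ([] : List Int)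
        = ((List.range' s (e + 1 - s)).map (pvColF lines)).foldl (fun nums col =>
          let ds := (col.take opRow).filter PySem.Chars.isdigit
          if ds = [] then nums else nums ++ [(PySem.Int.ofChars? ds).getD 0]) ([] : List Int) := by
      rw [List.foldl_map]
      apply PySem.List.foldl_congr_mem
      intro nums c hc
      have hds : (List.range opRow).foldl (fun acc r =>
            if PySem.Chars.isdigit (((pvGridA lines).getD r []).getD c ' ')
            then acc ++ [((pvGridA lines).getD r []).getD c ' '] else acc) []
          = ((pvColF lines c).take opRow).filter PySem.Chars.isdigit := by
        have hcong : (List.range opRow).foldl (fun acc r =>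
              if PySem.Chars.isdigit (((pvGridA lines).getD r []).getD c ' ')
              then acc ++ [((pvGridA lines).getD r []).getD c ' '] else acc) []
            = (List.range opRow).foldl (fun acc r =>
              if PySem.Chars.isdigit ((pvColF lines c).getD r ' ')
              then acc ++ [(pvColF lines c).getD r ' '] else acc) [] := by
          apply PySem.List.foldl_congr_mem
          intro acc r hrm
          rw [pvAcc lines r c (lt_trans (List.mem_range.1 hrm) hop)]
        rw [hcong]
        exact digits_fold (pvColF lines c) PySem.Chars.isdigit opRow
          (by unfold pvColF; rw [List.length_map]; omega)
      rw [hds]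
    rw [hnums]

-- A's main body is the state machine; machine_main turns it into runs of columns
theorem pvMain_eq (lines : List String) (opRow : Nat)
    (hop : opRow < lines.length) :
    pvAMain lines opRow
      = pvRuns pvNonblank (pvGroupVal opRow) ((List.range (pvW lines)).map (pvColF lines)) 0 := by
  have hclen : ((List.range (pvW lines)).map (pvColF lines)).length = pvW lines := by simp
  have hstep : ∀ (st : List (Nat × Nat) × Bool × Nat), ∀ c ∈ List.range (pvW lines),
      pvAStep lines st c
        = pvStep pvNonblank ([] : List Char) ((List.range (pvW lines)).map (pvColF lines)) st c := by
    intro st c hc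
    have hcW : c < pvW lines := List.mem_range.1 hc
    unfold pvAStep pvStep
    have hcond : (!(((List.range (pvW lines)).map (fun c =>
          (List.range lines.length).all
            (fun r => ((pvGridA lines).getD r []).getD c ' ' == ' '))).getD c true))
        = pvNonblank (((List.range (pvW lines)).map (pvColF lines)).getD c []) := by
      rw [PySem.List.getD_map_range _ _ _ _ hcW, PySem.List.getD_map_range _ _ _ _ hcW]
      have h1 : (List.range lines.length).all
            (fun r => ((pvGridA lines).getD r []).getD c ' ' == ' ')
          = (List.range lines.length).all (fun r => (pvColF lines c).getD r ' ' == ' ') :=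
        all_congr' _ _ _ (fun r hrm => by rw [pvAcc lines r c (List.mem_range.1 hrm)])
      rw [h1]
      have hlen : (pvColF lines c).length = lines.length := by unfold pvColF; simp
      rw [← hlen, all_range_getD (pvColF lines c) (fun ch => ch == ' ') ' ']
      unfold pvNonblank
      rw [List.all_eq_not_any_not]
      simp [bne]
    rw [hcond]
  have hbody : ∀ (total : Int) (se : Nat × Nat),
      (match ((List.range' se.1 (se.2 + 1 - se.1)).map
          (fun c => ((pvGridA lines).getD opRow []).getD c ' ')).find? pvIsOp with
      | none => total
      | some op =>
        let nums := (List.range' se.1 (se.2 + 1 - se.1)).foldl (fun nums c =>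
          let ds := (List.range opRow).foldl (fun acc r =>
            if PySem.Chars.isdigit (((pvGridA lines).getD r []).getD c ' ')
            then acc ++ [((pvGridA lines).getD r []).getD c ' '] else acc) []
          if ds = [] then nums else nums ++ [(PySem.Int.ofChars? ds).getD 0]) ([] : List Int)
        if nums = [] then total
        else if op == '+' then total + nums.foldl (· + ·) 0
        else total + nums.foldl (· * ·) 1)
      = total + pvAVal lines opRow se := by
    intro total se
    unfold pvAVal
    cases hf : ((List.range' se.1 (se.2 + 1 - se.1)).map
        (fun c => ((pvGridA lines).getD opRow []).getD c ' ')).find? pvIsOp with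
    | none => simp
    | some op =>
      simp only []
      split_ifs <;> simp
  unfold pvAMain
  rw [PySem.List.foldl_congr_mem (List.range (pvW lines)) (pvAStep lines)
    (pvStep pvNonblank ([] : List Char) ((List.range (pvW lines)).map (pvColF lines)))
    (([], false, 0)) (fun st c hc => hstep st c hc)]
  rw [PySem.List.foldl_congr_mem _ _ (fun a se => a + pvAVal lines opRow se) 0
    (fun a se _ => hbody a se)]
  have hval : ∀ s e : Nat, s ≤ e → e < ((List.range (pvW lines)).map (pvColF lines)).length →
      pvAVal lines opRow (s, e)
        = pvGroupVal opRow
            ((((List.range (pvW lines)).map (pvColF lines)).drop s).take (e + 1 - s)) := by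
    intro s e hse he
    exact pvVal_eq lines opRow hop s e hse (by rwa [hclen] at he)
  have hm := machine_main pvNonblank (pvGroupVal opRow) ([] : List Char)
    ((List.range (pvW lines)).map (pvColF lines)) (pvAVal lines opRow) hval
  unfold pvFin at hm
  rw [hclen] at hm
  exact hm

-- ========== B-side proof layer ==========

-- staged restatements of B's port
def pvPass1 (lines : List String) : PySem.Set Int × Option Int :=
  (PySem.List.enumerate lines).foldl (fun st rl =>
      (PySem.List.enumerate rl.2.toList).foldl (fun st cc =>
        if cc.2 != ' ' then
          (PySem.Set.add st.1 cc.1,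
           if cc.2 == '+' || cc.2 == '*' then some rl.1 else st.2)
        else st) st)
    ((PySem.Set.empty : PySem.Set Int), (none : Option Int))

def pvNumD (lines : List String) (R : Nat) : PySem.Dict Int (List Char) :=
  (lines.take R).foldl (fun d line =>
      (PySem.List.enumerate line.toList).foldl (fun d cc =>
        if PySem.Chars.isdigit cc.2 then
          PySem.Dict.insert d cc.1 (PySem.Dict.getD d cc.1 [] ++ [cc.2])
        else d) d) (PySem.Dict.empty : PySem.Dict Int (List Char))

def pvGStep (V : List Int → Int) : (Int × List Int) → Option Int → Int × List Int :=
  fun st oc =>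
    let st' :=
      if st.2 ≠ [] ∧ (oc = none ∨ oc ≠ some (st.2.getLast! + 1)) then
        (st.1 + V st.2, ([] : List Int))
      else st
    match oc with
    | some c => (st'.1, st'.2 ++ [c])
    | none => st'

def pvBMain (lines : List String) (R : Nat) : Int :=
  (((PySem.List.sorted (pvPass1 lines).1 (fun x => x)).map some ++ [none]).foldl
    (pvGStep (pvGroupValB (lines.getD R "").toList (pvNumD lines R))) ((0 : Int), ([] : List Int))).1

theorem solve_classical_alt_eq (text : String) :
    solve_classical_alt text =
      match (pvPass1 (PySem.Str.splitlines text)).2 with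
      | none => 0
      | some opRow => pvBMain (PySem.Str.splitlines text) opRow.toNat := by
  rfl

theorem inner_snd (r : Int) (L : List (Int × Char)) :
    ∀ st : PySem.Set Int × Option Int,
    ((L.foldl (fun st cc =>
        if cc.2 != ' ' then
          (PySem.Set.add st.1 cc.1, if cc.2 == '+' || cc.2 == '*' then some r else st.2)
        else st) st).2)
      = if L.any (fun cc => pvIsOp cc.2) then some r else st.2 := by
  induction L with
  | nil => intro st; simp
  | cons cc L ih =>
    intro st
    rw [List.foldl_cons, List.any_cons]
    by_cases h1 : pvIsOp cc.2 = true
    · have hsp : (cc.2 != ' ') = true := by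
        unfold pvIsOp at h1
        rcases Bool.or_eq_true_iff.1 h1 with h | h <;>
          · rw [beq_iff_eq] at h; rw [h]; decide
      unfold pvIsOp at h1
      rw [if_pos hsp, ih]
      cases L.any (fun cc => pvIsOp cc.2) <;> simp [pvIsOp, h1]
    · have h1' : (cc.2 == '+' || cc.2 == '*') = false := by
        unfold pvIsOp at h1; simpa using h1
      unfold pvIsOp
      rw [h1', Bool.false_or]
      by_cases hsp : (cc.2 != ' ') = true
      · rw [if_pos hsp, ih]; rfl
      · rw [if_neg hsp, ih]; rfl

theorem any_enum (xs : List Char) (s : Int) :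
    (PySem.List.enumerate xs s).any (fun cc => pvIsOp cc.2) = xs.any pvIsOp := by
  conv_rhs => rw [← PySem.List.map_snd_enumerate xs s]
  rw [List.any_map]
  rfl

theorem pass1_snd (lines : List String) :
    (pvPass1 lines).2
      = match (List.range lines.length).reverse.find?
          (fun r => (lines.getD r "").toList.any pvIsOp) with
        | none => none
        | some r => some (r : Int) := by
  induction lines using List.reverseRecOn with
  | nil => rfl
  | append_singleton l x ih =>
    unfold pvPass1
    rw [PySem.List.enumerate_append, List.foldl_append]
    rw [show PySem.List.enumerate [x] (0 + (l.length : Int)) = [((l.length : Int), x)] from by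
      rw [PySem.List.enumerate_cons]; simp]
    rw [List.foldl_cons, List.foldl_nil, inner_snd, any_enum]
    have hrange : (List.range (l ++ [x]).length).reverse = l.length :: (List.range l.length).reverse := by
      rw [List.length_append, List.length_singleton, List.range_succ, List.reverse_append]
      rfl
    rw [hrange, List.find?_cons]
    have hx : (l ++ [x]).getD l.length "" = x := by
      rw [List.getD_append_right l [x] "" l.length le_rfl]
      simp
    by_cases hax : x.toList.any pvIsOp = true
    · rw [if_pos hax]
      simp only [hx, hax, if_true]
    · rw [if_neg hax]
      simp only [hx, hax, Bool.false_eq_true, if_false]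
      rw [find?_congr' _ _ (fun r => (l.getD r "").toList.any pvIsOp)
        (fun r hr => by
          rw [List.getD_append l [x] "" r (by
            have := List.mem_reverse.1 hr; simpa using List.mem_range.1 this)])]
      unfold pvPass1 at ih
      exact ih

theorem inner_fst_mem (r : Int) (L : List (Int × Char)) (j : Int) :
    ∀ st : PySem.Set Int × Option Int,
    (j ∈ (L.foldl (fun st cc =>
        if cc.2 != ' ' then
          (PySem.Set.add st.1 cc.1, if cc.2 == '+' || cc.2 == '*' then some r else st.2)
        else st) st).1
      ↔ j ∈ st.1 ∨ ∃ cc ∈ L, cc.2 ≠ ' ' ∧ j = cc.1) := by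
  induction L with
  | nil => intro st; simp
  | cons cc L ih =>
    intro st
    rw [List.foldl_cons]
    by_cases hsp : (cc.2 != ' ') = true
    · rw [if_pos hsp, ih]
      simp only [PySem.Set.mem_add]
      constructor
      · rintro (⟨h | h⟩ | h)
        · exact Or.inl h
        · exact Or.inr ⟨cc, by simp, by simpa using hsp, h⟩
        · obtain ⟨c, hc, h1, h2⟩ := h
          exact Or.inr ⟨c, by simp [hc], h1, h2⟩
      · rintro (h | ⟨c, hc, h1, h2⟩)
        · exact Or.inl (Or.inl h)
        · rcases List.mem_cons.1 hc with rfl | hc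
          · exact Or.inl (Or.inr h2)
          · exact Or.inr ⟨c, hc, h1, h2⟩
    · rw [if_neg hsp, ih]
      have hsp' : cc.2 = ' ' := by simpa using hsp
      constructor
      · rintro (h | ⟨c, hc, h1, h2⟩)
        · exact Or.inl h
        · exact Or.inr ⟨c, by simp [hc], h1, h2⟩
      · rintro (h | ⟨c, hc, h1, h2⟩)
        · exact Or.inl h
        · rcases List.mem_cons.1 hc with rfl | hc
          · exact absurd hsp' h1
          · exact Or.inr ⟨c, hc, h1, h2⟩

theorem inner_fst_nodup (r : Int) (L : List (Int × Char)) :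
    ∀ st : PySem.Set Int × Option Int, st.1.Nodup →
    (L.foldl (fun st cc =>
        if cc.2 != ' ' then
          (PySem.Set.add st.1 cc.1, if cc.2 == '+' || cc.2 == '*' then some r else st.2)
        else st) st).1.Nodup := by
  induction L with
  | nil => intro st h; exact h
  | cons cc L ih =>
    intro st h
    rw [List.foldl_cons]
    by_cases hsp : (cc.2 != ' ') = true
    · rw [if_pos hsp]; exact ih _ (PySem.Set.nodup_add _ _ h)
    · rw [if_neg hsp]; exact ih _ h

theorem outer_fst_mem (L : List (Int × String)) (j : Int) :
    ∀ st : PySem.Set Int × Option Int,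
    (j ∈ (L.foldl (fun st rl =>
        (PySem.List.enumerate rl.2.toList).foldl (fun st cc =>
          if cc.2 != ' ' then
            (PySem.Set.add st.1 cc.1, if cc.2 == '+' || cc.2 == '*' then some rl.1 else st.2)
          else st) st) st).1
      ↔ j ∈ st.1 ∨ ∃ rl ∈ L, ∃ k : Nat, k < rl.2.toList.length
          ∧ rl.2.toList.getD k ' ' ≠ ' ' ∧ j = (k : Int)) := by
  induction L with
  | nil => intro st; simp
  | cons rl L ih =>
    intro st
    rw [List.foldl_cons, ih]
    rw [inner_fst_mem]
    have henum : ∀ (cc : Int × Char), cc ∈ PySem.List.enumerate rl.2.toList ↔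
        ∃ k : Nat, ∃ _ : k < rl.2.toList.length, cc = ((k : Int), rl.2.toList[k]) := by
      intro cc
      rw [PySem.List.mem_enumerate_iff]
      constructor
      · rintro ⟨k, hk, rfl⟩; exact ⟨k, hk, by simp⟩
      · rintro ⟨k, hk, rfl⟩; exact ⟨k, hk, by simp⟩
    constructor
    · rintro ((h | ⟨cc, hcc, h1, h2⟩) | ⟨rl', hrl', hk⟩)
      · exact Or.inl h
      · obtain ⟨k, hk, rfl⟩ := henum cc |>.1 hcc
        exact Or.inr ⟨rl, by simp, k, hk, by
          rw [List.getD_eq_getElem _ ' ' hk]; exact h1, h2⟩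
      · exact Or.inr ⟨rl', by simp [hrl'], hk⟩
    · rintro (h | ⟨rl', hrl', k, hk, h1, h2⟩)
      · exact Or.inl (Or.inl h)
      · rcases List.mem_cons.1 hrl' with rfl | hrl'
        · refine Or.inl (Or.inr ⟨((k : Int), rl'.2.toList[k]), (henum _).2 ⟨k, hk, rfl⟩, ?_, h2⟩)
          rw [List.getD_eq_getElem _ ' ' hk] at h1; exact h1
        · exact Or.inr ⟨rl', hrl', k, hk, h1, h2⟩

theorem pass1_fst_mem (lines : List String) (j : Int) :
    j ∈ (pvPass1 lines).1
      ↔ ∃ k : Nat, j = (k : Int) ∧ pvNonblank (pvColF lines k) = true := by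
  unfold pvPass1
  rw [outer_fst_mem]
  simp only [PySem.Set.empty]
  constructor
  · rintro (h | ⟨rl, hrl, k, hk, h1, h2⟩)
    · simp at h
    · refine ⟨k, h2, ?_⟩
      unfold pvNonblank pvColF
      rw [List.any_map, List.any_eq_true]
      obtain ⟨i, hi, rfl⟩ := (PySem.List.mem_enumerate_iff _ _ _).1 hrl
      refine ⟨lines[i], by simp, ?_⟩
      simp only [Function.comp, bne_iff_ne, ne_eq]
      simpa using h1
  · rintro ⟨k, rfl, hq⟩
    unfold pvNonblank pvColF at hq
    rw [List.any_map, List.any_eq_true] at hq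
    obtain ⟨l, hl, hne⟩ := hq
    simp only [Function.comp, bne_iff_ne, ne_eq] at hne
    obtain ⟨i, hi, rfl⟩ := List.mem_iff_getElem.1 hl
    have hklen : k < lines[i].toList.length := by
      by_contra hge
      rw [List.getD_eq_default _ ' ' (by omega)] at hne
      simp at hne
    refine Or.inr ⟨((i : Int), lines[i]), ?_, k, hklen, by simpa using hne, rfl⟩
    rw [PySem.List.mem_enumerate_iff]
    exact ⟨i, hi, by simp⟩

theorem pass1_fst_nodup (lines : List String) : (pvPass1 lines).1.Nodup := by
  unfold pvPass1
  generalize (PySem.List.enumerate lines) = L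
  have : ∀ st : PySem.Set Int × Option Int, st.1.Nodup →
      (L.foldl (fun st rl =>
        (PySem.List.enumerate rl.2.toList).foldl (fun st cc =>
          if cc.2 != ' ' then
            (PySem.Set.add st.1 cc.1, if cc.2 == '+' || cc.2 == '*' then some rl.1 else st.2)
          else st) st) st).1.Nodup := by
    induction L with
    | nil => intro st h; exact h
    | cons rl L ih =>
      intro st h
      rw [List.foldl_cons]
      exact ih _ (inner_fst_nodup rl.1 _ st h)
  exact this _ (by simp [PySem.Set.empty])

theorem qc_lt_W (lines : List String) (hl : lines ≠ []) (k : Nat)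
    (h : pvNonblank (pvColF lines k) = true) : k < pvW lines := by
  unfold pvNonblank pvColF at h
  rw [List.any_map, List.any_eq_true] at h
  obtain ⟨l, hml, hne⟩ := h
  simp only [Function.comp, bne_iff_ne, ne_eq] at hne
  have hk : k < l.toList.length := by
    by_contra hge
    rw [List.getD_eq_default _ ' ' (by omega)] at hne
    simp at hne
  exact lt_of_lt_of_le hk (pvW_isMax lines hl l hml)

theorem sorted_pass1 (lines : List String) (hl : lines ≠ []) :
    PySem.List.sorted (pvPass1 lines).1 (fun x => x)
      = ((List.range (pvW lines)).filter (fun c => pvNonblank (pvColF lines c))).map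
          (fun k => Int.ofNat k) := by
  apply PySem.List.sorted_eq_of_perm_of_pairwise_lt
  · apply (List.perm_ext_iff_of_nodup ?_ (pass1_fst_nodup lines)).2
    · intro j
      rw [pass1_fst_mem]
      simp only [List.mem_map, List.mem_filter, List.mem_range]
      constructor
      · rintro ⟨k, ⟨hkr, hq⟩, rfl⟩
        exact ⟨k, by simp, hq⟩
      · rintro ⟨k, rfl, hq⟩
        exact ⟨k, ⟨qc_lt_W lines hl k hq, hq⟩, by simp⟩
    · exact (List.nodup_range.filter _).map (fun a b h => by
        simpa [Int.ofNat_eq_natCast] using h)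
  · refine List.Pairwise.map _ (fun a b h => ?_) ((List.pairwise_lt_range.filter _))
    simpa [Int.ofNat_eq_natCast] using h

-- the digit-dict inner loop: one line's contribution to column k

theorem numInner_getD (xs : List Char) (d : PySem.Dict Int (List Char)) (k : Nat) :
    ((PySem.List.enumerate xs).foldl (fun d cc =>
        if PySem.Chars.isdigit cc.2 then
          PySem.Dict.insert d cc.1 (PySem.Dict.getD d cc.1 [] ++ [cc.2])
        else d) d).getD (k : Int) []
      = d.getD (k : Int) [] ++ [xs.getD k ' '].filter PySem.Chars.isdigit := by
  have hspd : PySem.Chars.isdigit ' ' = false := by decide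
  induction xs using List.reverseRecOn generalizing k with
  | nil =>
    have : [List.getD [] k ' '].filter PySem.Chars.isdigit = [] := by
      rw [List.getD_nil]; simp [hspd]
    simp only [PySem.List.enumerate, List.foldl_nil, this, List.append_nil]
  | append_singleton ys x ih =>
    rw [PySem.List.enumerate_append, List.foldl_append]
    rw [show PySem.List.enumerate [x] (0 + (ys.length : Int)) = [((ys.length : Int), x)] from by
      rw [PySem.List.enumerate_cons]; simp]
    rw [List.foldl_cons, List.foldl_nil]
    by_cases hdig : PySem.Chars.isdigit x = true
    · rw [if_pos hdig]
      by_cases hk : k = ys.length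
      · subst hk
        rw [PySem.Dict.getD_insert_self, ih]
        rw [List.getD_eq_default ys ' ' le_rfl,
          List.getD_append_right ys [x] ' ' ys.length le_rfl]
        simp [hdig, hspd]
      · rw [PySem.Dict.getD_insert_of_ne _ _ _
          (show (k : Int) ≠ (ys.length : Int) by exact_mod_cast hk), ih]
        congr 2
        rcases Nat.lt_or_ge k ys.length with h | h
        · rw [List.getD_append ys [x] ' ' k h]
        · rw [List.getD_eq_default _ ' ' h, List.getD_eq_default _ ' ' (by simp; omega)]
    · rw [if_neg hdig, ih]
      have hdig' : PySem.Chars.isdigit x = false := by simpa using hdig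
      have hflt : [ys.getD k ' '].filter PySem.Chars.isdigit
          = [(ys ++ [x]).getD k ' '].filter PySem.Chars.isdigit := by
        rcases Nat.lt_or_ge k ys.length with h | h
        · rw [List.getD_append ys [x] ' ' k h]
        · rcases Nat.lt_or_ge k (ys.length + 1) with h2 | h2
          · have hk : k = ys.length := by omega
            subst hk
            rw [List.getD_eq_default ys ' ' le_rfl,
              List.getD_append_right ys [x] ' ' ys.length le_rfl]
            simp [List.filter_cons, hspd, hdig']
          · rw [List.getD_eq_default ys ' ' h, List.getD_eq_default _ ' ' (by simp; omega)]
      rw [hflt]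

theorem numInner_contains (xs : List Char) (d : PySem.Dict Int (List Char)) (k : Nat) :
    ((PySem.List.enumerate xs).foldl (fun d cc =>
        if PySem.Chars.isdigit cc.2 then
          PySem.Dict.insert d cc.1 (PySem.Dict.getD d cc.1 [] ++ [cc.2])
        else d) d).contains (k : Int)
      = (d.contains (k : Int) || !([xs.getD k ' '].filter PySem.Chars.isdigit).isEmpty) := by
  have hspd : PySem.Chars.isdigit ' ' = false := by decide
  induction xs using List.reverseRecOn generalizing k with
  | nil =>
    have : [List.getD [] k ' '].filter PySem.Chars.isdigit = [] := by
      rw [List.getD_nil]; simp [hspd]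
    simp only [PySem.List.enumerate, List.foldl_nil, this, List.isEmpty_nil, Bool.not_true,
      Bool.or_false]
  | append_singleton ys x ih =>
    rw [PySem.List.enumerate_append, List.foldl_append]
    rw [show PySem.List.enumerate [x] (0 + (ys.length : Int)) = [((ys.length : Int), x)] from by
      rw [PySem.List.enumerate_cons]; simp]
    rw [List.foldl_cons, List.foldl_nil]
    by_cases hdig : PySem.Chars.isdigit x = true
    · rw [if_pos hdig, PySem.Dict.contains_insert]
      by_cases hk : k = ys.length
      · subst hk
        rw [List.getD_append_right ys [x] ' ' ys.length le_rfl]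
        simp [hdig]
      · rw [show (((k : Int) == (ys.length : Int))) = false from by
          simpa using (by exact_mod_cast hk : (k : Int) ≠ (ys.length : Int)), Bool.false_or, ih]
        congr 2
        rcases Nat.lt_or_ge k ys.length with h | h
        · rw [List.getD_append ys [x] ' ' k h]
        · rw [List.getD_eq_default ys ' ' h, List.getD_eq_default _ ' ' (by simp; omega)]
    · rw [if_neg hdig, ih]
      have hdig' : PySem.Chars.isdigit x = false := by simpa using hdig
      have hflt : [ys.getD k ' '].filter PySem.Chars.isdigit
          = [(ys ++ [x]).getD k ' '].filter PySem.Chars.isdigit := by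
        rcases Nat.lt_or_ge k ys.length with h | h
        · rw [List.getD_append ys [x] ' ' k h]
        · rcases Nat.lt_or_ge k (ys.length + 1) with h2 | h2
          · have hk : k = ys.length := by omega
            subst hk
            rw [List.getD_eq_default ys ' ' le_rfl,
              List.getD_append_right ys [x] ' ' ys.length le_rfl]
            simp [List.filter_cons, hspd, hdig']
          · rw [List.getD_eq_default ys ' ' h, List.getD_eq_default _ ' ' (by simp; omega)]
      rw [hflt]

theorem numRows_getD (rows : List String) :
    ∀ (d : PySem.Dict Int (List Char)) (k : Nat),
    (rows.foldl (fun d line =>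
        (PySem.List.enumerate line.toList).foldl (fun d cc =>
          if PySem.Chars.isdigit cc.2 then
            PySem.Dict.insert d cc.1 (PySem.Dict.getD d cc.1 [] ++ [cc.2])
          else d) d) d).getD (k : Int) []
      = d.getD (k : Int) []
          ++ (rows.map (fun l => l.toList.getD k ' ')).filter PySem.Chars.isdigit := by
  induction rows with
  | nil => intro d k; simp
  | cons line rest ih =>
    intro d k
    rw [List.foldl_cons, ih, numInner_getD]
    simp only [List.map_cons, List.filter_cons, List.append_assoc]
    split <;> rfl

theorem numRows_contains (rows : List String) :
    ∀ (d : PySem.Dict Int (List Char)) (k : Nat),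
    (rows.foldl (fun d line =>
        (PySem.List.enumerate line.toList).foldl (fun d cc =>
          if PySem.Chars.isdigit cc.2 then
            PySem.Dict.insert d cc.1 (PySem.Dict.getD d cc.1 [] ++ [cc.2])
          else d) d) d).contains (k : Int)
      = (d.contains (k : Int)
          || !((rows.map (fun l => l.toList.getD k ' ')).filter PySem.Chars.isdigit).isEmpty) := by
  induction rows with
  | nil => intro d k; simp
  | cons line rest ih =>
    intro d k
    rw [List.foldl_cons, ih, numInner_contains]
    simp only [List.map_cons, List.filter_cons, Bool.or_assoc]
    congr 1
    cases hc : PySem.Chars.isdigit (line.toList.getD k ' ') <;>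
      simp [List.filter, List.isEmpty_cons]

-- the digit dict: value and key-presence per column
theorem numD_getD (lines : List String) (R : Nat) (k : Nat) :
    (pvNumD lines R).getD (k : Int) []
      = ((pvColF lines k).take R).filter PySem.Chars.isdigit := by
  unfold pvNumD pvColF
  rw [numRows_getD, PySem.Dict.getD_empty, List.nil_append, ← List.map_take]

theorem numD_contains (lines : List String) (R : Nat) (k : Nat) :
    (pvNumD lines R).contains (k : Int)
      = !(((pvColF lines k).take R).filter PySem.Chars.isdigit).isEmpty := by
  unfold pvNumD pvColF
  rw [numRows_contains, PySem.Dict.contains_empty, Bool.false_or, ← List.map_take]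

-- B's flush value on a consecutive run = A's group value on the column segment
theorem groupValB_eq (lines : List String) (R : Nat) (hR : R < lines.length)
    (s k : Nat) (hk : 0 < k) (hsk : s + k ≤ pvW lines) :
    pvGroupValB (lines.getD R "").toList (pvNumD lines R) ((List.range' s k).map (fun c => Int.ofNat c))
      = pvGroupVal R ((((List.range (pvW lines)).map (pvColF lines)).drop s).take k) := by
  have hseg := seg_map (pvW lines) s k (pvColF lines) hsk
  rw [hseg]
  have hopF : pvIsOp ' ' = false := by decide
  have hopline : ∀ c : Nat, (pvColF lines c).getD R ' ' = (lines.getD R "").toList.getD c ' ' := by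
    intro c
    unfold pvColF
    rw [List.getD_eq_getElem (lines.map (fun l => l.toList.getD c ' ')) ' ' (by simpa using hR),
      List.getD_eq_getElem lines "" hR]
    simp
  have hgetL : ∀ c : Nat,
      ((PySem.List.pyGet? (lines.getD R "").toList (Int.ofNat c)).getD ' ')
        = (lines.getD R "").toList.getD c ' ' := by
    intro c
    rw [show Int.ofNat c = (c : Int) from rfl, PySem.List.pyGet?_natCast]
    rfl
  have hcnd : ∀ c : Nat,
      (decide ((Int.ofNat c) < PySem.List.len (lines.getD R "").toList)
          && pvIsOp ((PySem.List.pyGet? (lines.getD R "").toList (Int.ofNat c)).getD ' '))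
        = pvIsOp ((pvColF lines c).getD R ' ') := by
    intro c
    rw [hgetL, hopline]
    rcases Nat.lt_or_ge c (lines.getD R "").toList.length with h | h
    · rw [decide_eq_true (by simp [PySem.List.len]; exact_mod_cast h), Bool.true_and]
    · rw [List.getD_eq_default _ ' ' h, hopF, Bool.and_false]
  -- the two operator searches agree
  have hOP : Option.map (fun j => (PySem.List.pyGet? (lines.getD R "").toList j).getD ' ')
        (((List.range' s k).map (fun c => Int.ofNat c)).find? (fun j =>
          decide (j < PySem.List.len (lines.getD R "").toList)
            && pvIsOp ((PySem.List.pyGet? (lines.getD R "").toList j).getD ' ')))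
      = (((List.range' s k).map (pvColF lines)).map (fun col => col.getD R ' ')).find? pvIsOp := by
    rw [List.find?_map, List.map_map, List.find?_map, Option.map_map]
    simp only [Function.comp_def]
    rw [find?_congr' (List.range' s k) _ (fun c => pvIsOp ((pvColF lines c).getD R ' '))
      (fun c _ => hcnd c)]
    cases hf : (List.range' s k).find? (fun c => pvIsOp ((pvColF lines c).getD R ' ')) with
    | none => rfl
    | some c0 => simp only [Option.map_some]; rw [hgetL c0, show ((lines.getD R "").toList.getD c0 ' ')
        = ((pvColF lines c0).getD R ' ') from (hopline c0).symm]
  -- the two number lists agree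
  have hVS : (((List.range' s k).map (fun c => Int.ofNat c)).filter
        (fun j => PySem.Dict.contains (pvNumD lines R) j)).map
        (fun j => (PySem.Int.ofChars? (PySem.Dict.getD (pvNumD lines R) j [])).getD 0)
      = ((List.range' s k).map (pvColF lines)).foldl (fun nums col =>
          let ds := (col.take R).filter PySem.Chars.isdigit
          if ds = [] then nums else nums ++ [(PySem.Int.ofChars? ds).getD 0]) ([] : List Int) := by
    rw [List.filter_map, List.map_map, List.foldl_map]
    rw [PySem.List.foldl_congr_mem (List.range' s k) _
      (fun nums c => if !(((pvColF lines c).take R).filter PySem.Chars.isdigit).isEmpty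
        then nums ++ [(PySem.Int.ofChars? (((pvColF lines c).take R).filter PySem.Chars.isdigit)).getD 0]
        else nums) ([] : List Int)
      (fun nums c _ => by
        simp only []
        cases hds : (((pvColF lines c).take R).filter PySem.Chars.isdigit).isEmpty with
        | false =>
          rw [if_neg (by simpa [List.isEmpty_iff] using hds)]
          simp
        | true =>
          rw [if_pos (by simpa [List.isEmpty_iff] using hds)]
          simp)]
    rw [PySem.List.foldl_append_if
      (fun c => !(((pvColF lines c).take R).filter PySem.Chars.isdigit).isEmpty)
      (fun c => (PySem.Int.ofChars? (((pvColF lines c).take R).filter PySem.Chars.isdigit)).getD 0),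
      List.nil_append]
    rw [List.filter_congr (fun c _ => by
      show PySem.Dict.contains (pvNumD lines R) (Int.ofNat c)
        = !(((pvColF lines c).take R).filter PySem.Chars.isdigit).isEmpty
      exact numD_contains lines R c)]
    exact List.map_congr_left (fun c _ => by
      show (PySem.Int.ofChars? (PySem.Dict.getD (pvNumD lines R) (Int.ofNat c) [])).getD 0 = _
      rw [show Int.ofNat c = (c : Int) from rfl, numD_getD lines R c])
  simp only [pvGroupValB, pvGroupVal]
  rw [hOP, hVS]
  cases hop : (((List.range' s k).map (pvColF lines)).map (fun col => col.getD R ' ')).find? pvIsOp with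
  | none => rfl
  | some opc =>
    rw [List.sum_eq_foldl]

theorem lastBang (l : List Int) (x : Int) : (l ++ [x]).getLast! = x := by
  rw [List.getLast!_eq_getLast?_getD, List.getLast?_concat]
  rfl

theorem lastRun (a b : Nat) (h : 0 < b) :
    ((List.range' a b).map Int.ofNat).getLast! = Int.ofNat (a + b - 1) := by
  obtain ⟨c, rfl⟩ : ∃ c, b = c + 1 := ⟨b - 1, by omega⟩
  rw [List.range'_concat, List.map_append, List.map_singleton, lastBang]
  congr 1
  omega

-- if the next input flushes anyway, the pending run may be flushed now
theorem gstep_flush (V : List Int → Int) (T : Int) (run : List Int) (hrun : run ≠ [])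
    (oc : Option Int) (hoc : oc = none ∨ oc ≠ some (run.getLast! + 1)) (L : List (Option Int)) :
    (oc :: L).foldl (pvGStep V) (T, run) = (oc :: L).foldl (pvGStep V) (T + V run, []) := by
  rw [List.foldl_cons, List.foldl_cons]
  have hstep : pvGStep V (T, run) oc = pvGStep V (T + V run, []) oc := by
    unfold pvGStep
    rw [if_pos ⟨hrun, hoc⟩, if_neg (fun h => h.1 rfl)]
  rw [hstep]

-- the grouping fold over the sorted non-blank indices, against the runs of the column list
theorem bfold_aux {α : Type} (q : α → Bool) (g : List α → Int) (d : α) (xs : List α)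
    (V : List Int → Int)
    (hV : ∀ s k : Nat, 0 < k → s + k ≤ xs.length →
      V ((List.range' s k).map Int.ofNat) = g ((xs.drop s).take k)) :
    ∀ (t m : Nat), m + t = xs.length → ∀ (T : Int),
      (((((((List.range' m t).filter (fun i => q (xs.getD i d))).map Int.ofNat).map some)
          ++ [none]).foldl (pvGStep V) (T, ([] : List Int))).1
        = T + pvRuns q g (xs.drop m) 0)
      ∧ (∀ s0 : Nat, s0 < m → (∀ i, s0 ≤ i → i < m → q (xs.getD i d) = true) →
        (((((((List.range' m t).filter (fun i => q (xs.getD i d))).map Int.ofNat).map some)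
            ++ [none]).foldl (pvGStep V)
            (T, (List.range' s0 (m - s0)).map Int.ofNat)).1
          = T + (g ((xs.drop s0).take (m - s0) ++ (xs.drop m).takeWhile q)
              + pvRuns q g ((xs.drop m).dropWhile q) 0))) := by
  intro t
  induction t with
  | zero =>
    intro m hm T
    have hm' : m = xs.length := by omega
    subst hm'
    constructor
    · simp [pvGStep, pvRuns, List.drop_length]
    · intro s0 hs0 hq'
      have hrne : ((List.range' s0 (xs.length - s0)).map Int.ofNat) ≠ [] := by
        simp [List.range'_eq_nil_iff]
        omega
      simp only [List.range'_zero, List.filter_nil, List.map_nil, List.nil_append,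
        List.foldl_cons, List.foldl_nil]
      have hstep : pvGStep V (T, (List.range' s0 (xs.length - s0)).map Int.ofNat) none
          = (T + V ((List.range' s0 (xs.length - s0)).map Int.ofNat), []) := by
        unfold pvGStep
        rw [if_pos ⟨hrne, Or.inl rfl⟩]
      rw [hstep]
      rw [show (T + V ((List.range' s0 (xs.length - s0)).map Int.ofNat), ([] : List Int)).1
        = T + V ((List.range' s0 (xs.length - s0)).map Int.ofNat) from rfl]
      rw [hV s0 (xs.length - s0) (by omega) (by omega)]
      rw [List.drop_length]
      simp only [List.takeWhile_nil, List.dropWhile_nil, List.append_nil]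
      simp only [pvRuns]
      ring
  | succ t ih =>
    intro m hm T
    have hmn : m < xs.length := by omega
    have hdropm : xs.drop m = xs.getD m d :: xs.drop (m + 1) := by
      rw [List.getD_eq_getElem xs d hmn]; exact List.drop_eq_getElem_cons hmn
    have hrsucc : List.range' m (t + 1) = m :: List.range' (m + 1) t := List.range'_succ
    constructor
    · rw [hrsucc, List.filter_cons]
      by_cases hq : q (xs.getD m d) = true
      · rw [if_pos hq]
        simp only [List.map_cons, List.cons_append, List.foldl_cons]
        have hstep : pvGStep V (T, ([] : List Int)) (some (Int.ofNat m))
            = (T, [Int.ofNat m]) := by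
          unfold pvGStep
          rw [if_neg (fun h => h.1 rfl)]
          rfl
        rw [hstep]
        
        have hrun1 : [Int.ofNat m] = (List.range' m (m + 1 - m)).map Int.ofNat := by
          rw [show m + 1 - m = 1 from by omega]
          rfl
        rw [hrun1]
        rw [(ih (m + 1) (by omega) T).2 m (by omega)
          (fun i h1 h2 => by rw [show i = m from by omega]; exact hq)]
        rw [show m + 1 - m = 1 from by omega]
        have ht1 : (xs.drop m).take 1 = [xs.getD m d] := by rw [hdropm]; rfl
        rw [ht1, hdropm, pvRuns, dif_pos hq,
          pvRuns_acc q g ((xs.getD m d :: xs.drop (m + 1)).dropWhile q)]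
        simp only [List.takeWhile_cons, List.dropWhile_cons, hq, if_true,
          List.singleton_append]
        ring
      · rw [if_neg hq]
        rw [(ih (m + 1) (by omega) T).1]
        rw [hdropm, pvRuns, dif_neg hq]
    · intro s0 hs0 hq'
      have hms : 0 < m - s0 := by omega
      have hlast : ((List.range' s0 (m - s0)).map Int.ofNat).getLast! + 1 = Int.ofNat m := by
        rw [lastRun s0 (m - s0) hms]
        rw [show s0 + (m - s0) - 1 = m - 1 from by omega]
        simp only [Int.ofNat_eq_natCast]
        omega
      have hrne : ((List.range' s0 (m - s0)).map Int.ofNat) ≠ [] := by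
        simp [List.range'_eq_nil_iff]
        omega
      rw [hrsucc, List.filter_cons]
      by_cases hq : q (xs.getD m d) = true
      · rw [if_pos hq]
        simp only [List.map_cons, List.cons_append, List.foldl_cons]
        have hstep : pvGStep V (T, (List.range' s0 (m - s0)).map Int.ofNat) (some (Int.ofNat m))
            = (T, ((List.range' s0 (m - s0)).map Int.ofNat) ++ [Int.ofNat m]) := by
          unfold pvGStep
          rw [if_neg (fun h => by
            rcases h.2 with h' | h'
            · exact absurd h' (by simp)
            · exact h' (by rw [hlast]))]
        rw [hstep]
        have hrun1 : ((List.range' s0 (m - s0)).map Int.ofNat) ++ [Int.ofNat m]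
            = (List.range' s0 (m + 1 - s0)).map Int.ofNat := by
          rw [show m + 1 - s0 = (m - s0) + 1 from by omega, List.range'_concat,
            List.map_append, List.map_singleton]
          congr 3
          omega
        rw [hrun1]
        rw [(ih (m + 1) (by omega) T).2 s0 (by omega)
          (fun i h1 h2 => by
            rcases Nat.lt_or_ge i m with him | him
            · exact hq' i h1 him
            · obtain rfl : i = m := by omega
              exact hq)]
        have hts : (xs.drop s0).take (m + 1 - s0)
            = (xs.drop s0).take (m - s0) ++ [xs.getD m d] := by
          rw [show m + 1 - s0 = (m - s0) + 1 from by omega, List.take_add_one,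
            List.getElem?_drop, show s0 + (m - s0) = m from by omega,
            List.getElem?_eq_getElem hmn, List.getD_eq_getElem xs d hmn]
          simp
        rw [hts, hdropm]
        simp only [List.takeWhile_cons, List.dropWhile_cons, hq, if_true,
          List.append_assoc, List.singleton_append]
      · rw [if_neg hq]
        have hflush := gstep_flush V T ((List.range' s0 (m - s0)).map Int.ofNat) hrne
        have hrw : ((((List.range' (m + 1) t).filter (fun i => q (xs.getD i d))).map
              Int.ofNat).map some ++ [none]).foldl (pvGStep V)
              (T, (List.range' s0 (m - s0)).map Int.ofNat)
            = ((((List.range' (m + 1) t).filter (fun i => q (xs.getD i d))).map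
              Int.ofNat).map some ++ [none]).foldl (pvGStep V)
              (T + V ((List.range' s0 (m - s0)).map Int.ofNat), []) := by
          cases hF : ((List.range' (m + 1) t).filter (fun i => q (xs.getD i d))) with
          | nil =>
            exact hflush none (Or.inl rfl) []
          | cons i F' =>
            simp only [List.map_cons, List.cons_append]
            refine hflush (some (Int.ofNat i)) (Or.inr (fun h => ?_)) _
            rw [hlast] at h
            have hi : i ∈ List.range' (m + 1) t := by
              have := List.mem_of_mem_filter (a := i)
                (by rw [hF]; exact List.mem_cons_self)
              exact this
            have him : m + 1 ≤ i := (List.mem_range'_1.1 hi).1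
            have : i = m := by
              have := Option.some.inj h
              simpa [Int.ofNat_eq_natCast] using this
            omega
        rw [hrw]
        rw [(ih (m + 1) (by omega) _).1]
        rw [hV s0 (m - s0) hms (by omega)]
        rw [hdropm]
        have hq0 : q (xs.getD m d) = false := by simpa using hq
        simp only [List.takeWhile_cons, List.dropWhile_cons, hq0, Bool.false_eq_true, if_false,
          List.append_nil]
        have hr : pvRuns q g (xs.getD m d :: xs.drop (m + 1)) 0
            = pvRuns q g (xs.drop (m + 1)) 0 := by
          rw [pvRuns, dif_neg hq]
        rw [hr]
        ring

-- the grouping fold over the sorted index list computes the runs of the column list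
theorem bfold_main (lines : List String) (R : Nat) (hR : R < lines.length) (hl : lines ≠ []) :
    pvBMain lines R
      = pvRuns pvNonblank (pvGroupVal R) ((List.range (pvW lines)).map (pvColF lines)) 0 := by
  have hlen : ((List.range (pvW lines)).map (pvColF lines)).length = pvW lines := by simp
  have hV : ∀ s k : Nat, 0 < k → s + k ≤ ((List.range (pvW lines)).map (pvColF lines)).length →
      pvGroupValB (lines.getD R "").toList (pvNumD lines R) ((List.range' s k).map Int.ofNat)
        = pvGroupVal R ((((List.range (pvW lines)).map (pvColF lines)).drop s).take k) := by
    intro s k hk hsk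
    exact groupValB_eq lines R hR s k hk (by omega)
  have haux := (bfold_aux pvNonblank (pvGroupVal R) ([] : List Char)
      ((List.range (pvW lines)).map (pvColF lines))
      (pvGroupValB (lines.getD R "").toList (pvNumD lines R)) hV
      (pvW lines) 0 (by simp) 0).1
  have hfq : (List.range (pvW lines)).filter (fun c => pvNonblank (pvColF lines c))
      = (List.range' 0 (pvW lines)).filter
          (fun i => pvNonblank (((List.range (pvW lines)).map (pvColF lines)).getD i [])) := by
    rw [← List.range_eq_range']
    exact List.filter_congr (fun i hi => by
      rw [PySem.List.getD_map_range _ _ _ _ (List.mem_range.1 hi)])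
  unfold pvBMain
  rw [sorted_pass1 lines hl, hfq]
  rw [List.drop_zero, zero_add] at haux
  exact haux

-- ===== VERDICT (by name: the statement is the Claim_ definition above) =====
theorem solve_classical_spec : Claim_equal_solve_classical := by
  unfold Claim_equal_solve_classical Spec_solve_classical
  intro text _
  rw [solve_classical_eq, solve_classical_alt_eq, pass1_snd]
  by_cases hl : PySem.Str.splitlines text = []
  · simp [hl]
  · simp only [if_neg hl]
    rw [find?_congr' _ _ (fun r => (PySem.Str.splitlines text |>.getD r "").toList.any pvIsOp)
      (fun r hr => rowAny_eq _ r (by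
        have := List.mem_reverse.1 hr
        simpa using List.mem_range.1 this))]
    cases hfind : (List.range (PySem.Str.splitlines text).length).reverse.find?
        (fun r => ((PySem.Str.splitlines text).getD r "").toList.any pvIsOp) with
    | none => rfl
    | some opRow =>
      have hop : opRow < (PySem.Str.splitlines text).length := by
        have := List.mem_of_find?_eq_some hfind
        simpa using this
      show pvAMain (PySem.Str.splitlines text) opRow
          = pvBMain (PySem.Str.splitlines text) ((opRow : Int)).toNat
      have ht : ((opRow : Int)).toNat = opRow := Int.toNat_natCast opRow
      rw [ht, pvMain_eq _ opRow hop, bfold_main _ opRow hop hl]
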